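-- pv_equiv track=rewrite | github.com/Independent-AI-Labs/polymarket-insider-tracker | src/polymarket_insider_tracker/storage/repos.py | _validate_cadences
-- ===== SOURCE A (Python) =====
-- ALLOWED_CADENCES: frozenset[str] = frozenset({"daily", "weekly", "monthly"})
--
-- def _validate_cadences(cadences: list[str]) -> list[str]:
--     """Reject cadences not in ALLOWED_CADENCES; preserve order + dedup."""
--     seen: list[str] = []
--     for c in cadences:
--         normal = c.strip().lower()
--         if normal not in ALLOWED_CADENCES:
--             msg = f"invalid cadence: {c!r}"
--             raise ValueError(msg)
--         if normal not in seen: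
--             seen.append(normal)
--     if not seen:
--         msg = "cadences must not be empty"
--         raise ValueError(msg)
--     return seen
-- ===== SOURCE B (Python) =====
-- ALLOWED_CADENCES: frozenset[str] = frozenset({"daily", "weekly", "monthly"})
--
-- def _dedup_valid(cadences: list[str]) -> list[str]:
--     """Recursively validate; keep head, drop its later duplicates from the suffix result."""
--     if not cadences:
--         return []
--     c = cadences[0]
--     n = c.strip().lower()
--     if n not in ALLOWED_CADENCES:
--         raise ValueError(f"invalid cadence: {c!r}")
--     rest = _dedup_valid(cadences[1:])
--     return [n] + [x for x in rest if x != n]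
--
-- def _validate_cadences(cadences: list[str]) -> list[str]:
--     if not cadences:
--         raise ValueError("cadences must not be empty")
--     return _dedup_valid(cadences)
-- ===== Notes on version B (the rewrite author's own statement) =====
-- stated objective: alternative
-- what changed: Replaces A's iterative loop with a 'seen' accumulator and membership scan by a recursive decomposition with no accumulator: keep the head's normalization and filter its later duplicates out of the recursively deduped suffix.
import Mathlib
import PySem

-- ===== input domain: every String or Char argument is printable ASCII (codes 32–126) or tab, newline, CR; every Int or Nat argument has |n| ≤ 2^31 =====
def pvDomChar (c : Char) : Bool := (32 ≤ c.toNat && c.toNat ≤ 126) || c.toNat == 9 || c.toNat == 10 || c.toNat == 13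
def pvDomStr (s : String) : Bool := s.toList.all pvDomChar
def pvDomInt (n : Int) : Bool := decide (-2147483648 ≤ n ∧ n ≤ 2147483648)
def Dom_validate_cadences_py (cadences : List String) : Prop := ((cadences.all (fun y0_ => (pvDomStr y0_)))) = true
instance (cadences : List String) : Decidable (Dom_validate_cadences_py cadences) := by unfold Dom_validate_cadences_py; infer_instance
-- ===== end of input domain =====

-- B replaces A's iterative loop with a 'seen' accumulator by an accumulator-free recursion:
-- keep the head's normalization, filter its later duplicates out of the recursively deduped
-- suffix. ValueError paths (invalid cadence, empty input) are excluded by Pre_.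

-- shared normalization: c.strip().lower()
def pvNorm (c : String) : String := PySem.Str.lower (PySem.Str.strip c)

def pvAllowed : List String := ["daily", "weekly", "monthly"]

-- ===== PORT A =====
-- the 'raise ValueError' branches have no value; Pre_ excludes inputs reaching them
def validate_cadences_py (cadences : List String) : List String :=
  cadences.foldl (fun seen c =>
    let normal := pvNorm c
    if seen.contains normal then seen else seen ++ [normal]) []

-- ===== PORT B =====
-- recursive helper _dedup_valid: head's normalization, then filter it out of the deduped tail
def pvDedupValid : List String → List String
  | [] => []
  | c :: tl =>
    let n := pvNorm c
    n :: (pvDedupValid tl).filter (fun x => x ≠ n)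

def validate_cadences_py_alt (cadences : List String) : List String :=
  pvDedupValid cadences

-- ===== PRECONDITION & SPEC =====
-- Pre_ excludes exactly the inputs on which Python A raises ValueError:
-- the empty list and lists containing a cadence whose normalization is not allowed.
def Pre_validate_cadences_py (cadences : List String) : Prop :=
  cadences ≠ [] ∧ (cadences.all (fun c => pvAllowed.contains (pvNorm c))) = true
instance (cadences : List String) : Decidable (Pre_validate_cadences_py cadences) := by
  unfold Pre_validate_cadences_py; infer_instance

def pvWitness_validate_cadences_py : List String := ["Daily", "weekly", " DAILY "]

def Spec_validate_cadences_py (cadences : List String) (out : List String) : Prop :=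
  out = validate_cadences_py_alt cadences
instance (cadences : List String) (out : List String) :
    Decidable (Spec_validate_cadences_py cadences out) := by
  unfold Spec_validate_cadences_py; infer_instance

-- ===== CLAIM (what is proved, stated in full; the proofs are below) =====
def Claim_equal_validate_cadences_py : Prop :=
  ∀ (cadences : List String), Dom_validate_cadences_py cadences →
    Pre_validate_cadences_py cadences →
    Spec_validate_cadences_py cadences (validate_cadences_py cadences)

-- ===== LEMMAS AND PROOFS =====

-- A's loop is exactly set(map norm) in first-insertion order
theorem portA_eq_set (cadences : List String) :
    validate_cadences_py cadences = PySem.Set.ofList (cadences.map pvNorm) := by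
  unfold validate_cadences_py
  rw [PySem.Set.ofList_eq_foldl, List.foldl_map]
  congr 1

-- B's recursion computes the same set, by ofList_cons (head, then discard it from the rest)
theorem portB_eq_set (cadences : List String) :
    validate_cadences_py_alt cadences = PySem.Set.ofList (cadences.map pvNorm) := by
  unfold validate_cadences_py_alt
  induction cadences with
  | nil => rfl
  | cons c tl ih =>
    have hp : (fun x : String => decide (x ≠ pvNorm c)) = (fun y => !(y == pvNorm c)) := by
      funext x; by_cases h : x = pvNorm c <;> simp [h, Ne]
    simp only [pvDedupValid, List.map_cons, PySem.Set.ofList_cons, ih, PySem.Set.discard, hp]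

-- ===== VERDICT (by name: the statement is the Claim_ definition above) =====
theorem validate_cadences_py_spec : Claim_equal_validate_cadences_py := by
  intro cadences _ _
  unfold Spec_validate_cadences_py
  rw [portA_eq_set, portB_eq_set]
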